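-- pv_equiv track=rewrite | github.com/OkhotnikovFN/Yandex-Algorithms | trainings_2.0/division_b/hw_3/task_b/b.py | check_occurrence
-- ===== SOURCE A (Python) =====
-- from typing import List
--
-- def check_occurrence(nums_list: List[str]) -> List[str]:
--     """
--     Функция которая определяет, было ли уже число в списке.
--
--     :param nums_list: исходный список чисел
--     :type nums_list: List[str]
--
--     :return: список с ответами
--     :rtype: List[str]
--     """
--     nums_set = set()
--     result = []
--     for num in nums_list:
--         if num in nums_set:
--             result.append("YES")
--         else:
--             result.append("NO")
--             nums_set.add(num)
--
--     return result
-- ===== SOURCE B (Python) =====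
-- from typing import List
--
-- def check_occurrence(nums_list: List[str]) -> List[str]:
--     """Group indices by value, then scatter: prefill the answer with "YES" and
--     overwrite with "NO" at each group's first index (the first occurrence)."""
--     positions = {}
--     for i, num in enumerate(nums_list):
--         positions.setdefault(num, []).append(i)
--     result = ["YES"] * len(nums_list)
--     for idxs in positions.values():
--         result[idxs[0]] = "NO"
--     return result
-- ===== Notes on version B (the rewrite author's own statement) =====
-- stated objective: alternative
-- what changed: Replaces A's single incremental pass with a seen-set by a group-then-scatter scheme: first group all indices by value into a dict of position lists, then prefill the whole answer with "YES" and overwrite "NO" at each group's first index.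
import Mathlib
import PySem

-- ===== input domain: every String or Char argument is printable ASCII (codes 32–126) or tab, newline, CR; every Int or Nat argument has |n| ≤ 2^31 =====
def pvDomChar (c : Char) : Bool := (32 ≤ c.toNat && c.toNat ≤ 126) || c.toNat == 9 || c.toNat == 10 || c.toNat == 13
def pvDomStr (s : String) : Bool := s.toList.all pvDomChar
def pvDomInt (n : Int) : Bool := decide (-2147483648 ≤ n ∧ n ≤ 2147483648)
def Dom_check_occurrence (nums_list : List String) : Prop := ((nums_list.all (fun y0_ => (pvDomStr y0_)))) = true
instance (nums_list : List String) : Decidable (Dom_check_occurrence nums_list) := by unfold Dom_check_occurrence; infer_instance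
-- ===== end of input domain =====

-- B replaces A's incremental seen-set pass by group-then-scatter: group all indices by
-- value into a dict, prefill the answer with "YES", overwrite "NO" at each group's first
-- index. Alternative decomposition, not faster.

-- ===== PORT A =====
-- the 'for num in nums_list' loop with state (nums_set, result), as structural recursion
def check_occurrence_loop (nums_set : PySem.Set String) : List String → List String
  | [] => []
  | num :: rest =>
    if PySem.Set.contains nums_set num then
      "YES" :: check_occurrence_loop nums_set rest
    else
      "NO" :: check_occurrence_loop (PySem.Set.add nums_set num) rest

def check_occurrence (nums_list : List String) : List String :=
  check_occurrence_loop PySem.Set.empty nums_list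

-- ===== PORT B =====
def check_occurrence_alt (nums_list : List String) : List String :=
  -- positions.setdefault(num, []).append(i)  ==  positions[num] = positions.get(num, []) + [i];
  -- then: result = ["YES"] * len(nums_list); for idxs in positions.values(): result[idxs[0]] = "NO"
  (PySem.Dict.values
      ((PySem.List.enumerate nums_list).foldl
        (fun d p => d.modify p.2 [] (fun v => v ++ [p.1])) PySem.Dict.empty)).foldl
    (fun res idxs => PySem.List.pySetD res (PySem.List.pyGetD idxs 0 0) "NO")
    (List.replicate nums_list.length "YES")

-- ===== PRECONDITION & SPEC =====
def Spec_check_occurrence (nums_list : List String) (out : List String) : Prop := out = check_occurrence_alt nums_list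
instance (nums_list : List String) (out : List String) : Decidable (Spec_check_occurrence nums_list out) := by unfold Spec_check_occurrence; infer_instance

-- ===== CLAIM (what is proved, stated in full; the proofs are below) =====
def Claim_equal_check_occurrence : Prop := ∀ (nums_list : List String), Dom_check_occurrence nums_list → Spec_check_occurrence nums_list (check_occurrence nums_list)

-- ===== LEMMAS AND PROOFS =====

-- A's loop, when its seen-set has the same members as a list p, answers at each index i by
-- membership in p or in the already-traversed part xs.take i.
theorem check_occurrence_loop_eq (xs : List String) :
    ∀ (seen : PySem.Set String) (p : List String),
      (∀ s, s ∈ seen ↔ s ∈ p) →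
      check_occurrence_loop seen xs =
        (List.range xs.length).map (fun i =>
          if (xs.getD i "") ∈ p ∨ (xs.getD i "") ∈ xs.take i then "YES" else "NO") := by
  induction xs with
  | nil => intro seen p h; simp [check_occurrence_loop]
  | cons x rest ih =>
    intro seen p h
    simp only [check_occurrence_loop, List.length_cons, List.range_succ_eq_map,
      List.map_cons, List.map_map]
    by_cases hx : x ∈ seen
    · rw [if_pos (by simpa [PySem.Set.contains_iff] using hx)]
      have hxp : x ∈ p := (h x).mp hx
      rw [ih seen p h]
      congr 1
      · simp [hxp]
      · apply List.map_congr_left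
        intro i _
        simp only [Function.comp_apply, List.getD_cons_succ, List.take_succ_cons,
          List.mem_cons]
        refine if_congr ?_ rfl rfl
        have hvp : rest.getD i "" = x → rest.getD i "" ∈ p := fun e => e ▸ hxp
        tauto
    · rw [if_neg (by simpa [PySem.Set.contains_iff] using hx)]
      have hxp : x ∉ p := fun hp => hx ((h x).mpr hp)
      rw [ih (PySem.Set.add seen x) (p ++ [x]) (by
        intro s; simp [PySem.Set.mem_add, h s, or_comm])]
      congr 1
      · simp [hxp]
      · apply List.map_congr_left
        intro i _
        simp only [Function.comp_apply, List.getD_cons_succ, List.take_succ_cons,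
          List.mem_cons, List.mem_append]
        refine if_congr ?_ rfl rfl
        simp only [List.mem_nil_iff, or_false]
        tauto

-- the positions (as Python ints, from start s) at which k occurs in xs
def occFrom (s : Int) (k : String) : List String → List Int
  | [] => []
  | x :: rest => if x = k then s :: occFrom (s + 1) k rest else occFrom (s + 1) k rest

theorem occFrom_filter_enumerate (k : String) (xs : List String) : ∀ (s : Int),
    ((((PySem.List.enumerate xs s).map (fun p => (p.2, p.1))).filter
        (fun p => p.1 == k)).map (·.2)) = occFrom s k xs := by
  induction xs with
  | nil => intro s; simp [PySem.List.enumerate_nil, occFrom]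
  | cons x rest ih =>
    intro s
    by_cases hx : x = k <;>
      simp [PySem.List.enumerate_cons, occFrom, hx, ih]

theorem occFrom_head (k : String) (xs : List String) (hk : k ∈ xs) : ∀ (s : Int),
    (occFrom s k xs).getD 0 0 = s + (xs.idxOf k : Int) := by
  induction xs with
  | nil => cases hk
  | cons x rest ih =>
    intro s
    by_cases hx : x = k
    · subst hx; simp [occFrom, List.idxOf_cons_self]
    · have hk' : k ∈ rest := by
        rcases List.mem_cons.mp hk with h | h
        · exact absurd h.symm hx
        · exact h
      have hne : ¬ (x == k) = true := by simpa using hx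
      rw [occFrom, if_neg hx, ih hk' (s + 1), List.idxOf_cons, Bool.cond_eq_ite, if_neg hne]
      push_cast
      ring

-- scattering "NO" at a list of nonnegative Int positions, read back at index i
theorem scatter_getD (ps : List Int) (hps : ∀ j ∈ ps, 0 ≤ j) :
    ∀ (init : List String) (i : Nat), i < init.length →
      ((ps.foldl (fun r j => PySem.List.pySetD r j "NO") init).getD i "") =
        if (i : Int) ∈ ps then "NO" else init.getD i "" := by
  induction ps with
  | nil => intro init i _; simp
  | cons j ps' ih =>
    intro init i hi
    have hj : 0 ≤ j := hps j (List.mem_cons_self ..)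
    have hps' : ∀ j' ∈ ps', 0 ≤ j' := fun j' h => hps j' (List.mem_cons_of_mem _ h)
    simp only [List.foldl_cons, PySem.List.pySetD_of_nonneg init "NO" hj]
    rw [ih hps' (init.set j.toNat "NO") i (by simpa using hi)]
    by_cases hij : (i : Int) = j
    · have hji : j.toNat = i := by omega
      subst hji
      simp [List.getD_eq_getElem?_getD, hi, hij]
    · have hne : j.toNat ≠ i := by omega
      simp [List.getD_eq_getElem?_getD, hij, List.getElem?_set_ne hne]

theorem scatter_length (ps : List Int) : ∀ (init : List String),
    (ps.foldl (fun r j => PySem.List.pySetD r j "NO") init).length = init.length := by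
  induction ps with
  | nil => intro init; rfl
  | cons j ps' ih => intro init; rw [List.foldl_cons, ih, PySem.List.length_pySetD]

-- i carries "NO" iff some value has its first occurrence at i, iff xs[i] is new at i
theorem first_occ_iff (xs : List String) (i : Nat) (hi : i < xs.length) :
    (∃ k ∈ xs, xs.idxOf k = i) ↔ xs[i] ∉ xs.take i := by
  constructor
  · rintro ⟨k, hkmem, hk⟩ hmem
    have hlt : xs.idxOf k < xs.length := hk ▸ hi
    have hxk : xs[i] = k := by
      have := List.getElem_idxOf hlt
      simp only [hk] at this
      exact this
    rw [hxk] at hmem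
    have := (List.mem_take_iff_idxOf_lt hkmem).mp hmem
    omega
  · intro hmem
    refine ⟨xs[i], List.getElem_mem hi, ?_⟩
    have hk1 : xs[i] ∈ xs.take (i + 1) := by
      have h1 : i < (xs.take (i + 1)).length := by simp; omega
      have : (xs.take (i + 1))[i] = xs[i] := List.getElem_take
      exact this ▸ List.getElem_mem h1
    have hle := (List.mem_take_iff_idxOf_lt (List.getElem_mem hi)).mp hk1
    have hge : ¬ xs.idxOf xs[i] < i := fun h =>
      hmem ((List.mem_take_iff_idxOf_lt (List.getElem_mem hi)).mpr h)
    omega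

-- B as a scatter of "NO" over the first-occurrence indices of the distinct values
theorem check_occurrence_alt_eq (xs : List String) :
    check_occurrence_alt xs =
      ((PySem.Set.ofList xs).map (fun k => (xs.idxOf k : Int))).foldl
        (fun r j => PySem.List.pySetD r j "NO") (List.replicate xs.length "YES") := by
  unfold check_occurrence_alt
  have hkeys :
      ((PySem.List.enumerate xs).foldl
        (fun d p => d.modify p.2 [] (fun v => v ++ [p.1])) PySem.Dict.empty).keys =
      PySem.Set.ofList xs := by
    have h := PySem.Dict.keys_foldl_modify_key (PySem.List.enumerate xs)
      (fun p => p.2) [] (fun _ p v => v ++ [p.1]) PySem.Dict.empty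
    simpa [PySem.List.map_snd_enumerate, PySem.Set.update_nil_left] using h
  have hgetD : ∀ k,
      ((PySem.List.enumerate xs).foldl
        (fun d p => d.modify p.2 [] (fun v => v ++ [p.1])) PySem.Dict.empty).getD k [] =
      occFrom 0 k xs := by
    intro k
    have h := PySem.Dict.getD_foldl_modify_append
      ((PySem.List.enumerate xs).map (fun p => (p.2, p.1))) PySem.Dict.empty k
    simp only [List.foldl_map] at h
    simpa [occFrom_filter_enumerate k xs 0] using h
  rw [PySem.Dict.values_eq_map_keys _ (by rw [hkeys]; exact PySem.Set.nodup_ofList xs) [],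
    hkeys, List.foldl_map, List.foldl_map]
  apply PySem.List.foldl_congr_mem
  intro acc k hk
  rw [hgetD k, PySem.List.pyGetD_zero,
    occFrom_head k xs ((PySem.Set.mem_ofList xs k).mp hk) 0, zero_add]

-- ===== VERDICT (by name: the statement is the Claim_ definition above) =====
theorem check_occurrence_spec : Claim_equal_check_occurrence := by
  intro xs _
  unfold Spec_check_occurrence check_occurrence
  rw [check_occurrence_loop_eq xs PySem.Set.empty [] (by simp [PySem.Set.empty]),
    check_occurrence_alt_eq]
  have hlen : (((PySem.Set.ofList xs).map (fun k => (xs.idxOf k : Int))).foldl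
      (fun r j => PySem.List.pySetD r j "NO") (List.replicate xs.length "YES")).length
      = xs.length := by
    rw [scatter_length, List.length_replicate]
  apply List.ext_getElem (by simpa using hlen.symm)
  intro i hi1 hi2
  have hi : i < xs.length := by simpa using hi1
  rw [List.getElem_map, List.getElem_range,
    ← List.getD_eq_getElem _ "" hi2,
    scatter_getD _ (by simp) _ i (by simpa using hi)]
  have hmem : ((i : Int) ∈ (PySem.Set.ofList xs).map (fun k => (xs.idxOf k : Int))) ↔
      xs[i] ∉ xs.take i := by
    rw [← first_occ_iff xs i hi]
    simp only [List.mem_map, PySem.Set.mem_ofList]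
    constructor
    · rintro ⟨k, hk, he⟩; exact ⟨k, hk, by exact_mod_cast he⟩
    · rintro ⟨k, hk, he⟩; exact ⟨k, hk, by exact_mod_cast he⟩
  rw [List.getD_eq_getElem xs "" hi]
  by_cases hcase : xs[i] ∈ xs.take i
  · rw [if_pos (by simp [hcase]), if_neg (by rw [hmem]; exact fun h => h hcase)]
    simp [hi]
  · rw [if_neg (by simp [hcase]), if_pos (hmem.mpr hcase)]
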